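-- pv_equiv track=rewrite | github.com/pypi-data/pypi-mirror-404 | packages/souleyez/souleyez-3.0.5.tar.gz/souleyez-3.0.5/souleyez/ai/report_context.py | _format_top_findings
-- ===== SOURCE A (Python) =====
-- from typing import Any, Dict, List, Optional
--
-- def _format_top_findings(
--     findings: List[Dict], limit: int = 5, include_medium: bool = False
-- ) -> str:
--     """Format top critical/high findings as text."""
--     severity_order = {"critical": 0, "high": 1, "medium": 2, "low": 3, "info": 4}
--
--     # Filter to critical/high (and optionally medium)
--     max_severity = 2 if include_medium else 1
--     priority_findings = [
--         f
--         for f in findings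
--         if severity_order.get(f.get("severity", "info").lower(), 4) <= max_severity
--     ]
--
--     # Sort by severity
--     priority_findings.sort(
--         key=lambda f: severity_order.get(f.get("severity", "info").lower(), 4)
--     )
--
--     # Format
--     lines = []
--     for f in priority_findings[:limit]:
--         sev = f.get("severity", "unknown").upper()
--         title = f.get("title", "Unknown")
--         desc = f.get("description", "")[:100]
--         lines.append(f"- [{sev}] {title}")
--         if desc:
--             lines.append(f"  {desc}...")
--
--     return "\n".join(lines) if lines else "No critical or high severity findings."
-- ===== SOURCE B (Python) =====
-- def _finding_lines(f):
--     sev = f.get("severity", "unknown").upper()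
--     title = f.get("title", "Unknown")
--     desc = f.get("description", "")[:100]
--     if desc:
--         return [f"- [{sev}] {title}", f"  {desc}..."]
--     return [f"- [{sev}] {title}"]
--
--
-- def _format_top_findings(findings, limit=5, include_medium=False):
--     """Format top critical/high findings as text (bucket pass per severity level)."""
--     severity_order = {"critical": 0, "high": 1, "medium": 2, "low": 3, "info": 4}
--     ranked = [
--         f
--         for level in range(3 if include_medium else 2)
--         for f in findings
--         if severity_order.get(f.get("severity", "info").lower(), 4) == level
--     ]
--     lines = [line for f in ranked[:limit] for line in _finding_lines(f)]
--     return "\n".join(lines) if lines else "No critical or high severity findings."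
-- ===== Notes on version B (the rewrite author's own statement) =====
-- stated objective: alternative
-- what changed: Replaces filter-then-stable-sort with a counting/bucket pass: for each severity level 0..max in order, collect the findings of exactly that level (preserving input order, which reproduces the stable sort), and formats each finding through a helper returning its one or two lines, flattened by a comprehension instead of an append loop.
import Mathlib
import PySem

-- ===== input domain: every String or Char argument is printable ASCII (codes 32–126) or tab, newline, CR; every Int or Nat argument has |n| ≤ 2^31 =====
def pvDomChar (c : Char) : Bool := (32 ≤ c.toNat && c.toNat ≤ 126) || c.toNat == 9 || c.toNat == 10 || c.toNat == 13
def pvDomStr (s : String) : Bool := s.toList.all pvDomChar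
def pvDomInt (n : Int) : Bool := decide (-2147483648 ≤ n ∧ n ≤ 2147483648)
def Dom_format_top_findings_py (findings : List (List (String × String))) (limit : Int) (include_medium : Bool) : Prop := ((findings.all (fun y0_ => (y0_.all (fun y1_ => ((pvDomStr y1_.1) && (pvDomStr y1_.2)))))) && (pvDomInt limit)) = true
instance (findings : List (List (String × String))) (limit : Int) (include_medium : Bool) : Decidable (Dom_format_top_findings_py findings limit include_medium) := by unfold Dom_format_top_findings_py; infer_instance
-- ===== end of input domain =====

-- B replaces A's filter-then-stable-sort with bucket passes per severity level and a
-- flattening comprehension for the formatting loop; same output, no speed claim (alternative shape).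

-- ===== PORT A =====
-- f.get(key, default) on a Python dict argument (assoc list in insertion order)
def pvGetD (f : List (String × String)) (k d : String) : String :=
  PySem.Dict.getD (PySem.Dict.mk f) k d

-- severity_order = {...}
def pvSevOrder : PySem.Dict String Int :=
  PySem.Dict.ofList [("critical", 0), ("high", 1), ("medium", 2), ("low", 3), ("info", 4)]

-- severity_order.get(f.get("severity", "info").lower(), 4)
def pvRank (f : List (String × String)) : Int :=
  PySem.Dict.getD pvSevOrder (PySem.Str.lower (pvGetD f "severity" "info")) 4

def format_top_findings_py (findings : List (List (String × String))) (limit : Int) (include_medium : Bool) : String :=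
  let max_severity : Int := if include_medium then 2 else 1
  let priority_findings := findings.filter (fun f => decide (pvRank f ≤ max_severity))
  let priority_findings := PySem.List.sorted priority_findings pvRank
  let lines := (PySem.List.slice priority_findings none (some limit)).foldl (fun acc f =>
    let sev := PySem.Str.upper (pvGetD f "severity" "unknown")
    let title := pvGetD f "title" "Unknown"
    let desc := PySem.Str.slice (pvGetD f "description" "") none (some 100)
    let acc := acc ++ ["- [" ++ sev ++ "] " ++ title]
    if desc ≠ "" then acc ++ ["  " ++ desc ++ "..."] else acc) []
  if lines.isEmpty then "No critical or high severity findings." else PySem.Str.join "\n" lines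

-- ===== PORT B =====
def finding_lines_alt (f : List (String × String)) : List String :=
  let sev := PySem.Str.upper (pvGetD f "severity" "unknown")
  let title := pvGetD f "title" "Unknown"
  let desc := PySem.Str.slice (pvGetD f "description" "") none (some 100)
  if desc ≠ "" then ["- [" ++ sev ++ "] " ++ title, "  " ++ desc ++ "..."]
  else ["- [" ++ sev ++ "] " ++ title]

def format_top_findings_py_alt (findings : List (List (String × String))) (limit : Int) (include_medium : Bool) : String :=
  let ranked := (PySem.List.pyRange 0 (if include_medium then 3 else 2)).flatMap
    (fun level => findings.filter (fun f => pvRank f == level))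
  let lines := (PySem.List.slice ranked none (some limit)).flatMap finding_lines_alt
  if lines.isEmpty then "No critical or high severity findings." else PySem.Str.join "\n" lines

-- ===== PRECONDITION & SPEC =====
def Spec_format_top_findings_py (findings : List (List (String × String))) (limit : Int) (include_medium : Bool) (out : String) : Prop := out = format_top_findings_py_alt findings limit include_medium
instance (findings : List (List (String × String))) (limit : Int) (include_medium : Bool) (out : String) : Decidable (Spec_format_top_findings_py findings limit include_medium out) := by unfold Spec_format_top_findings_py; infer_instance

-- ===== CLAIM (what is proved, stated in full; the proofs are below) =====
def Claim_equal_format_top_findings_py : Prop := ∀ (findings : List (List (String × String))) (limit : Int) (include_medium : Bool), Dom_format_top_findings_py findings limit include_medium → Spec_format_top_findings_py findings limit include_medium (format_top_findings_py findings limit include_medium)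

-- ===== LEMMAS AND PROOFS =====

theorem flatMap_congr_mem {α β : Type} (l : List α) (f g : α → List β)
    (h : ∀ a ∈ l, f a = g a) : l.flatMap f = l.flatMap g := by
  induction l with
  | nil => rfl
  | cons a l ih =>
    simp only [List.flatMap_cons, h a (by simp), ih (fun a ha => h a (by simp [ha]))]

-- pvRank only takes values 0..4 (the dict's values, or the default 4)
theorem pvRank_bounds (f : List (String × String)) : 0 ≤ pvRank f ∧ pvRank f ≤ 4 := by
  have h : pvSevOrder = PySem.Dict.mk [("critical", 0), ("high", 1), ("medium", 2), ("low", 3), ("info", 4)] := rfl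
  unfold pvRank
  rw [h]
  simp only [PySem.Dict.getD, PySem.Dict.get?_mk_cons]
  split_ifs <;> simp [PySem.Dict.get?]

-- insertBy skips a prefix it is not inserted before
theorem insertBy_append_left {α : Type} (before : α → α → Bool) (x : α) (as bs : List α)
    (h : ∀ a ∈ as, before x a = false) :
    PySem.List.insertBy before x (as ++ bs) = as ++ PySem.List.insertBy before x bs := by
  induction as with
  | nil => simp
  | cons a as ih =>
    have ha : before x a = false := h a (by simp)
    simp [PySem.List.insertBy, ha, ih (fun a ha' => h a (by simp [ha']))]

-- insertBy puts x in front when it goes before every element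
theorem insertBy_of_forall_before {α : Type} (before : α → α → Bool) (x : α) (bs : List α)
    (h : ∀ b ∈ bs, before x b = true) :
    PySem.List.insertBy before x bs = x :: bs := by
  cases bs with
  | nil => simp [PySem.List.insertBy]
  | cons b bs => simp [PySem.List.insertBy, h b (by simp)]

-- inserting y into the bucket concatenation lands at the end of its own bucket
theorem insert_bucket {α : Type} (key : α → Int) (y : α) (ys : List α) :
    ∀ ks : List Int, ks.Pairwise (· < ·) → key y ∈ ks →
    PySem.List.insertBy (fun a b => decide (key a < key b)) y
      (ks.flatMap (fun i => ys.filter (fun x => key x == i)))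
    = ks.flatMap (fun i => (ys ++ [y]).filter (fun x => key x == i)) := by
  intro ks hp hm
  induction ks with
  | nil => simp at hm
  | cons i ks ih =>
    have hlt : ∀ j ∈ ks, i < j := (List.pairwise_cons.mp hp).1
    have hp' : ks.Pairwise (· < ·) := (List.pairwise_cons.mp hp).2
    by_cases hy : key y = i
    · -- y belongs to the first bucket: insert at the end of it
      have h1 : ∀ a ∈ ys.filter (fun x => key x == i), (fun a b => decide (key a < key b)) y a = false := by
        intro a ha
        have := List.of_mem_filter ha
        simp at this ⊢
        omega
      have h2 : ∀ b ∈ ks.flatMap (fun j => ys.filter (fun x => key x == j)),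
          (fun a b => decide (key a < key b)) y b = true := by
        intro b hb
        rw [List.mem_flatMap] at hb
        obtain ⟨j, hj, hbj⟩ := hb
        have hkb := List.of_mem_filter hbj
        have hij := hlt j hj
        simp at hkb ⊢
        omega
      rw [List.flatMap_cons, insertBy_append_left _ _ _ _ h1, insertBy_of_forall_before _ _ _ h2,
        List.flatMap_cons]
      have hfirst : (ys ++ [y]).filter (fun x => key x == i) = ys.filter (fun x => key x == i) ++ [y] := by
        simp [List.filter_append, hy]
      have hrest : ks.flatMap (fun j => (ys ++ [y]).filter (fun x => key x == j))
          = ks.flatMap (fun j => ys.filter (fun x => key x == j)) := by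
        apply flatMap_congr_mem
        intro j hj
        have hne : (key y == j) = false := by
          have := hlt j hj
          simp
          omega
        simp [List.filter_append, hne]
      rw [hfirst, hrest]
      simp
    · -- y belongs to a later bucket
      have hm' : key y ∈ ks := by
        rcases List.mem_cons.mp hm with h | h
        · exact absurd h hy
        · exact h
      have h1 : ∀ a ∈ ys.filter (fun x => key x == i), (fun a b => decide (key a < key b)) y a = false := by
        intro a ha
        have hk := List.of_mem_filter ha
        have := hlt _ hm'
        simp at hk ⊢
        omega
      rw [List.flatMap_cons, insertBy_append_left _ _ _ _ h1, ih hp' hm', List.flatMap_cons]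
      have hfirst : (ys ++ [y]).filter (fun x => key x == i) = ys.filter (fun x => key x == i) := by
        have hne : (key y == i) = false := by simp [hy]
        simp [List.filter_append, hne]
      rw [hfirst]

-- stable sort by an Int key whose values all lie in a strictly increasing list ks
-- equals the concatenation of the per-value buckets
theorem sorted_bucket {α : Type} (key : α → Int) (ks : List Int) (hks : ks.Pairwise (· < ·)) :
    ∀ ys : List α, (∀ x ∈ ys, key x ∈ ks) →
    PySem.List.sorted ys key = ks.flatMap (fun i => ys.filter (fun x => key x == i)) := by
  intro ys
  induction ys using List.reverseRecOn with
  | nil => simp [PySem.List.sorted_eq_foldl_insertBy]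
  | append_singleton ys y ih =>
    intro h
    rw [PySem.List.sorted_eq_foldl_insertBy, List.foldl_append, ← PySem.List.sorted_eq_foldl_insertBy]
    rw [ih (fun x hx => h x (by simp [hx]))]
    simp only [List.foldl_cons, List.foldl_nil]
    exact insert_bucket key y ys ks hks (h y (by simp))

-- A's filter-then-sort equals B's bucket concatenation
theorem sorted_filter_le (findings : List (List (String × String))) (m : Int) (ks : List Int)
    (hks : ks.Pairwise (· < ·))
    (hin : ∀ r : Int, 0 ≤ r → r ≤ 4 → r ≤ m → r ∈ ks)
    (hout : ∀ i ∈ ks, i ≤ m) :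
    PySem.List.sorted (findings.filter (fun f => decide (pvRank f ≤ m))) pvRank
    = ks.flatMap (fun i => findings.filter (fun f => pvRank f == i)) := by
  rw [sorted_bucket pvRank ks hks _ (by
    intro x hx
    have hb := pvRank_bounds x
    have hle : pvRank x ≤ m := by simpa using List.of_mem_filter hx
    exact hin _ hb.1 hb.2 hle)]
  apply flatMap_congr_mem
  intro i hi
  rw [List.filter_filter]
  apply List.filter_congr
  intro a _
  by_cases h : pvRank a = i
  · simp [h]
    exact hout i hi
  · simp [h]

-- ===== VERDICT (by name: the statement is the Claim_ definition above) =====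
theorem format_top_findings_py_spec : Claim_equal_format_top_findings_py := by
  intro findings limit include_medium _
  unfold Spec_format_top_findings_py format_top_findings_py format_top_findings_py_alt
  have hfold : ∀ l : List (List (String × String)),
      l.foldl (fun acc f =>
        let sev := PySem.Str.upper (pvGetD f "severity" "unknown")
        let title := pvGetD f "title" "Unknown"
        let desc := PySem.Str.slice (pvGetD f "description" "") none (some 100)
        let acc := acc ++ ["- [" ++ sev ++ "] " ++ title]
        if desc ≠ "" then acc ++ ["  " ++ desc ++ "..."] else acc) []
      = l.flatMap finding_lines_alt := by
    intro l
    have hstep : (fun (acc : List String) (f : List (String × String)) =>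
        let sev := PySem.Str.upper (pvGetD f "severity" "unknown")
        let title := pvGetD f "title" "Unknown"
        let desc := PySem.Str.slice (pvGetD f "description" "") none (some 100)
        let acc := acc ++ ["- [" ++ sev ++ "] " ++ title]
        if desc ≠ "" then acc ++ ["  " ++ desc ++ "..."] else acc)
        = fun acc f => acc ++ finding_lines_alt f := by
      funext acc f
      simp only [finding_lines_alt]
      split_ifs <;> simp
    rw [hstep, PySem.List.foldl_append_eq_flatMap]
    simp
  cases include_medium with
  | false =>
    simp only [Bool.false_eq_true, if_false]
    rw [show PySem.List.pyRange 0 2 = [0, 1] from by decide]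
    rw [sorted_filter_le findings 1 [0, 1] (by decide)
      (by intro r h0 h4 hm; simp only [List.mem_cons, List.not_mem_nil, or_false]; omega)
      (by intro i hi; simp at hi; omega)]
    rw [hfold]
  | true =>
    simp only [if_true]
    rw [show PySem.List.pyRange 0 3 = [0, 1, 2] from by decide]
    rw [sorted_filter_le findings 2 [0, 1, 2] (by decide)
      (by intro r h0 h4 hm; simp only [List.mem_cons, List.not_mem_nil, or_false]; omega)
      (by intro i hi; simp at hi; omega)]
    rw [hfold]
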